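-- pv_equiv track=rewrite | github.com/mateozorzi/TDA | Parciales/2024-c2-0/ej3.py | reconstruccion
-- ===== SOURCE A (Python) =====
-- def reconstruccion(precios, optimoVenta, optimoCompra, ganancia, dia):
--     if dia < 0:
--         return ganancia
--
--     if optimoCompra[dia] == precios[dia] and dia < ganancia[1]: #compre ese dia
--         ganancia[0] = dia
--         return reconstruccion(precios, optimoVenta, optimoCompra, ganancia, dia-1)
--     if precios[dia] - optimoCompra[dia] == optimoVenta[dia] and ganancia[1] == 0: #vendi ese dia
--         ganancia[1] = dia
--         return reconstruccion(precios, optimoVenta, optimoCompra, ganancia, dia-1)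
--     else: #no vendi ese dia
--         return reconstruccion(precios, optimoVenta, optimoCompra, ganancia, dia-1)
-- ===== SOURCE B (Python) =====
-- def reconstruccion(precios, optimoVenta, optimoCompra, ganancia, dia):
--     for d in range(dia, -1, -1):
--         if optimoCompra[d] == precios[d] and d < ganancia[1]:
--             ganancia[0] = d
--         elif precios[d] - optimoCompra[d] == optimoVenta[d] and ganancia[1] == 0:
--             ganancia[1] = d
--     return ganancia
-- ===== Notes on version B (the rewrite author's own statement) =====
-- stated objective: simpler
-- what changed: Replaces the tail recursion (re-passing all five arguments at every step) by a single for-loop over range(dia, -1, -1) mutating ganancia in place, with the same branch precedence.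
-- outside the precondition, e.g. on reconstruccion([1], [5], [2], [], 0): A returns [], B returns []
import Mathlib
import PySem

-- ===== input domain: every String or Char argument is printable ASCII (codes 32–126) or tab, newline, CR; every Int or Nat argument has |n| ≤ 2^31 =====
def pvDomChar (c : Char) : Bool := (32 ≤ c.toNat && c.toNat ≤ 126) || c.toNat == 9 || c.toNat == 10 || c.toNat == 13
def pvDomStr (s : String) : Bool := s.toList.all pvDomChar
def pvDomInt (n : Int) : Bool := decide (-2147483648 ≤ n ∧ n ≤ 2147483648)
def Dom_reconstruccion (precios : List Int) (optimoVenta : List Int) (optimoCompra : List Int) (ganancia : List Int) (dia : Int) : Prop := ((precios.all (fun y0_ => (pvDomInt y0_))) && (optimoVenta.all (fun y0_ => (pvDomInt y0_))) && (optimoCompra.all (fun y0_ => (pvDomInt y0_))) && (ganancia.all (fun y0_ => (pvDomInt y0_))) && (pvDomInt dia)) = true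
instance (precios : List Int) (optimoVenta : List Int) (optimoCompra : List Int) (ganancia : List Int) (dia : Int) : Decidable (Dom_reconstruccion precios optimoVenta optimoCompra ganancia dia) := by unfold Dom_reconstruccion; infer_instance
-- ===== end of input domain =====

-- B replaces A's tail recursion by a single fold over the countdown range, mutating
-- ganancia in place with the same branch precedence (objective: simpler).
-- Note: both A and B mutate the argument `ganancia` in place in Python; the
-- equivalence proved here is about the return value (the mutations coincide too).


-- ===== PORT A =====
-- Literal port of A's tail recursion; list accesses are in range under Pre_,
-- so pyGetD _ _ 0 is exact there.
def reconstruccion (precios : List Int) (optimoVenta : List Int) (optimoCompra : List Int) (ganancia : List Int) (dia : Int) : List Int :=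
  if dia < 0 then ganancia
  else if PySem.List.pyGetD optimoCompra dia 0 = PySem.List.pyGetD precios dia 0 ∧ dia < PySem.List.pyGetD ganancia 1 0 then
    reconstruccion precios optimoVenta optimoCompra (ganancia.set 0 dia) (dia - 1)
  else if PySem.List.pyGetD precios dia 0 - PySem.List.pyGetD optimoCompra dia 0 = PySem.List.pyGetD optimoVenta dia 0 ∧ PySem.List.pyGetD ganancia 1 0 = 0 then
    reconstruccion precios optimoVenta optimoCompra (ganancia.set 1 dia) (dia - 1)
  else
    reconstruccion precios optimoVenta optimoCompra ganancia (dia - 1)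
termination_by (dia + 1).toNat
decreasing_by all_goals omega

-- ===== PORT B =====
-- the body of B's for-loop over d
def reconstruccionStep (precios : List Int) (optimoVenta : List Int) (optimoCompra : List Int) (g : List Int) (d : Int) : List Int :=
  if PySem.List.pyGetD optimoCompra d 0 = PySem.List.pyGetD precios d 0 ∧ d < PySem.List.pyGetD g 1 0 then g.set 0 d
  else if PySem.List.pyGetD precios d 0 - PySem.List.pyGetD optimoCompra d 0 = PySem.List.pyGetD optimoVenta d 0 ∧ PySem.List.pyGetD g 1 0 = 0 then g.set 1 d
  else g

def reconstruccion_alt (precios : List Int) (optimoVenta : List Int) (optimoCompra : List Int) (ganancia : List Int) (dia : Int) : List Int :=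
  (PySem.List.pyRange dia (-1) (-1)).foldl (reconstruccionStep precios optimoVenta optimoCompra) ganancia

-- ===== PRECONDITION & SPEC =====
-- Pre_ excludes dia ≥ 0 inputs where one of the three DP lists is shorter than dia+1
-- or ganancia has fewer than 2 elements: there Python A may raise IndexError
-- (a few such inputs still return thanks to value-dependent short-circuiting; B behaves
-- identically on them, they are excluded only because no closed form separates them).
def Pre_reconstruccion (precios : List Int) (optimoVenta : List Int) (optimoCompra : List Int) (ganancia : List Int) (dia : Int) : Prop :=
  dia < 0 ∨ (dia < (precios.length : Int) ∧ dia < (optimoVenta.length : Int) ∧ dia < (optimoCompra.length : Int) ∧ 2 ≤ ganancia.length)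
instance (precios : List Int) (optimoVenta : List Int) (optimoCompra : List Int) (ganancia : List Int) (dia : Int) : Decidable (Pre_reconstruccion precios optimoVenta optimoCompra ganancia dia) := by unfold Pre_reconstruccion; infer_instance

def pvWitness_reconstruccion : List Int × List Int × List Int × List Int × Int := ([1, 3], [2, 1], [1, 2], [0, 0], 1)

def Spec_reconstruccion (precios : List Int) (optimoVenta : List Int) (optimoCompra : List Int) (ganancia : List Int) (dia : Int) (out : List Int) : Prop := out = reconstruccion_alt precios optimoVenta optimoCompra ganancia dia
instance (precios : List Int) (optimoVenta : List Int) (optimoCompra : List Int) (ganancia : List Int) (dia : Int) (out : List Int) : Decidable (Spec_reconstruccion precios optimoVenta optimoCompra ganancia dia out) := by unfold Spec_reconstruccion; infer_instance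

-- ===== CLAIM (what is proved, stated in full; the proofs are below) =====
def Claim_equal_reconstruccion : Prop := ∀ (precios : List Int) (optimoVenta : List Int) (optimoCompra : List Int) (ganancia : List Int) (dia : Int), Dom_reconstruccion precios optimoVenta optimoCompra ganancia dia → Pre_reconstruccion precios optimoVenta optimoCompra ganancia dia → Spec_reconstruccion precios optimoVenta optimoCompra ganancia dia (reconstruccion precios optimoVenta optimoCompra ganancia dia)

-- ===== LEMMAS AND PROOFS =====
theorem reconstruccion_eq_alt (precios optimoVenta optimoCompra : List Int) :
    ∀ (n : Nat) (dia : Int) (g : List Int), (dia + 1).toNat = n →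
      reconstruccion precios optimoVenta optimoCompra g dia = reconstruccion_alt precios optimoVenta optimoCompra g dia := by
  intro n
  induction n with
  | zero =>
    intro dia g h
    have hneg : dia ≤ -1 := by omega
    rw [reconstruccion, reconstruccion_alt, PySem.List.pyRange_neg_one_eq_nil hneg]
    simp [show dia < 0 by omega]
  | succ n ih =>
    intro dia g h
    by_cases hneg : dia < 0
    · rw [reconstruccion, reconstruccion_alt, PySem.List.pyRange_neg_one_eq_nil (by omega)]
      simp [hneg]
    · rw [reconstruccion, reconstruccion_alt,
        PySem.List.pyRange_neg_one_cons (show (-1 : Int) < dia by omega), List.foldl_cons]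
      have hstep : reconstruccionStep precios optimoVenta optimoCompra g dia =
          if PySem.List.pyGetD optimoCompra dia 0 = PySem.List.pyGetD precios dia 0 ∧ dia < PySem.List.pyGetD g 1 0 then g.set 0 dia
          else if PySem.List.pyGetD precios dia 0 - PySem.List.pyGetD optimoCompra dia 0 = PySem.List.pyGetD optimoVenta dia 0 ∧ PySem.List.pyGetD g 1 0 = 0 then g.set 1 dia
          else g := rfl
      rw [hstep]
      simp only [if_neg hneg]
      split_ifs with h1 h2 <;>
        [exact ih (dia - 1) (g.set 0 dia) (by omega);
         exact ih (dia - 1) (g.set 1 dia) (by omega);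
         exact ih (dia - 1) g (by omega)]

-- ===== VERDICT (by name: the statement is the Claim_ definition above) =====
theorem reconstruccion_spec : Claim_equal_reconstruccion := by
  intro precios optimoVenta optimoCompra ganancia dia _ _
  unfold Spec_reconstruccion
  exact reconstruccion_eq_alt precios optimoVenta optimoCompra _ dia ganancia rfl
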